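-- pv_equiv track=rewrite | github.com/KDesp73/irida | extra/training/features/halfkp.py | _fen_to_board
-- ===== SOURCE A (Python) =====
-- _FEN_TO_PT = {
--     "P": (0, 0), "N": (0, 1), "B": (0, 2), "R": (0, 3), "Q": (0, 4),
--     "p": (1, 5), "n": (1, 6), "b": (1, 7), "r": (1, 8), "q": (1, 9),
-- }
--
-- def _fen_to_board(fen: str) -> list[tuple[int, int]]:
--     """Parse FEN piece placement (first field) into (square, piece_type). Square 0-63, a8=0."""
--     parts = fen.split()
--     if not parts:
--         raise ValueError("Invalid FEN")
--     board = []
--     row, col = 0, 0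
--     for c in parts[0]:
--         if c == "/":
--             row += 1
--             col = 0
--             continue
--         if c.isdigit():
--             col += int(c)
--             continue
--         if c in _FEN_TO_PT:
--             _, pt = _FEN_TO_PT[c]
--             sq = row * 8 + col
--             if c.upper() != "K":
--                 board.append((sq, pt))
--             col += 1
--     return board
-- ===== SOURCE B (Python) =====
-- def _fen_to_board(fen: str) -> list[tuple[int, int]]:
--     """Parse FEN piece placement (first field) into (square, piece_type). Square 0-63, a8=0."""
--     parts = fen.split()
--     if not parts:
--         raise ValueError("Invalid FEN")
--     pt = "PNBRQpnbrq"  # piece_type = index in this string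
--     board = []
--     for row, rank in enumerate(parts[0].split("/")):
--         # staged per-rank pass: widths, then prefix-sum columns, then emit via zip
--         widths = [int(c) if c.isdigit() else (1 if c in pt else 0) for c in rank]
--         cols = []
--         col = 0
--         for w in widths:
--             cols.append(col)
--             col += w
--         board += [(row * 8 + col, pt.index(c)) for c, col in zip(rank, cols) if c in pt]
--     return board
-- ===== Notes on version B (the rewrite author's own statement) =====
-- stated objective: alternative
-- what changed: B replaces A's flat stateful character scan (row counted at '/' inline, col mutated per branch, dict of (color,piece) pairs) by a staged pipeline: split the field into ranks, per rank compute a widths list and its prefix-sum column list, then emit pieces with a zip comprehension using the index in the string 'PNBRQpnbrq' as the piece type.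
import Mathlib
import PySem

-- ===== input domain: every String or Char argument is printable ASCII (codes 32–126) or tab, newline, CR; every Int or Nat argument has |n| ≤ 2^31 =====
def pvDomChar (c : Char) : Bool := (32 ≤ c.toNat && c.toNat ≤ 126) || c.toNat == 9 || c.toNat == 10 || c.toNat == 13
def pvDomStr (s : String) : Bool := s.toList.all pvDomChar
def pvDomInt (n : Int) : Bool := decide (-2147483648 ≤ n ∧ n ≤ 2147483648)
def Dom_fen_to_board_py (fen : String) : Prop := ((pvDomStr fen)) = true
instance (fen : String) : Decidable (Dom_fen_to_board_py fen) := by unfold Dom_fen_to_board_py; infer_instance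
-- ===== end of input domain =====

-- B replaces A's flat stateful scan by a staged per-rank pipeline (widths list, prefix-sum
-- columns, zip comprehension, piece type = index in "PNBRQpnbrq"); objective: alternative, same cost.

-- ===== PORT A =====
-- _FEN_TO_PT (module constant): char → (color, piece_type)
def pvFenToPT : PySem.Dict Char (Int × Int) := PySem.Dict.mk
  [('P', (0, 0)), ('N', (0, 1)), ('B', (0, 2)), ('R', (0, 3)), ('Q', (0, 4)),
   ('p', (1, 5)), ('n', (1, 6)), ('b', (1, 7)), ('r', (1, 8)), ('q', (1, 9))]

-- int(c) for a char guarded by c.isdigit(): hand port, exact on ASCII digits '0'..'9'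
def pvDigitVal (c : Char) : Int := (c.toNat : Int) - 48

-- A's loop body over state (row, col, board)
def pvStepA : (Int × Int × List (Int × Int)) → Char → (Int × Int × List (Int × Int))
  | (row, col, board), c =>
    if c = '/' then (row + 1, 0, board)
    else if PySem.Chars.isdigit c then (row, col + pvDigitVal c, board)
    else
      match pvFenToPT.get? c with
      | some pv =>
          (row, col + 1,
            if PySem.Chars.upperChar c ≠ 'K' then board ++ [(row * 8 + col, pv.2)] else board)
      | none => (row, col, board)

def fen_to_board_py (fen : String) : List (Int × Int) :=
  match PySem.Str.split₀ fen with
  | [] => []          -- Python raises ValueError here; excluded by Pre_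
  | p0 :: _ => ((p0.toList).foldl pvStepA (0, 0, [])).2.2

-- ===== PORT B =====
-- pt = "PNBRQpnbrq"
def pvPtStr : List Char := ['P', 'N', 'B', 'R', 'Q', 'p', 'n', 'b', 'r', 'q']

-- width of one character: int(c) if c.isdigit() else (1 if c in pt else 0)
def pvWidthB (c : Char) : Int :=
  if PySem.Chars.isdigit c then pvDigitVal c else if pvPtStr.contains c then 1 else 0

-- cols: the prefix sums of the widths list (append col before adding w)
def pvColsB (ws : List Int) : List Int :=
  (ws.foldl (fun st w => (st.1 + w, st.2 ++ [st.1])) ((0 : Int), ([] : List Int))).2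

-- the zip comprehension: [(row*8+col, pt.index(c)) for c, col in zip(rank, cols) if c in pt]
def pvEmitB (row : Int) (s : List Char) : List (Int × Int) :=
  (s.zip (pvColsB (s.map pvWidthB))).filterMap
    (fun cc => if pvPtStr.contains cc.1
      then some (row * 8 + cc.2, ((PySem.List.index? pvPtStr cc.1).getD 0 : Nat))
      else none)

def fen_to_board_py_alt (fen : String) : List (Int × Int) :=
  match PySem.Str.split₀ fen with
  | [] => []          -- Python raises ValueError here; excluded by Pre_
  | p0 :: _ =>
      (PySem.List.enumerate (PySem.Chars.splitOn p0.toList ['/'])).foldl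
        (fun board rr => board ++ pvEmitB rr.1 rr.2) []

-- ===== PRECONDITION & SPEC =====
-- Pre_ excludes exactly the all-whitespace strings, on which both Pythons raise ValueError.
def Pre_fen_to_board_py (fen : String) : Prop :=
  (fen.toList.any (fun c => !PySem.Chars.isspace c)) = true
instance (fen : String) : Decidable (Pre_fen_to_board_py fen) := by
  unfold Pre_fen_to_board_py; infer_instance

def pvWitness_fen_to_board_py : String := "r1bqkbnr/pppp1ppp/8 b"

def Spec_fen_to_board_py (fen : String) (out : List (Int × Int)) : Prop := out = fen_to_board_py_alt fen
instance (fen : String) (out : List (Int × Int)) : Decidable (Spec_fen_to_board_py fen out) := by unfold Spec_fen_to_board_py; infer_instance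

-- ===== CLAIM (what is proved, stated in full; the proofs are below) =====
def Claim_equal_fen_to_board_py : Prop := ∀ (fen : String), Dom_fen_to_board_py fen → Pre_fen_to_board_py fen → Spec_fen_to_board_py fen (fen_to_board_py fen)

-- ===== LEMMAS AND PROOFS =====

-- reference splitter: pvSplit pre cs = the '/'-separated segments of pre ++ cs (pre already read)
def pvSplit (pre : List Char) : List Char → List (List Char)
  | [] => [pre]
  | c :: rest => if c = '/' then pre :: pvSplit [] rest else pvSplit (pre ++ [c]) rest

def pvJoin : List (List Char) → List Char
  | [] => []
  | [s] => s
  | s :: rest => s ++ '/' :: pvJoin rest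

lemma pvJoin_cons_cons (s t : List Char) (rest : List (List Char)) :
    pvJoin (s :: t :: rest) = s ++ '/' :: pvJoin (t :: rest) := rfl

lemma pvSplitOn_go (l : List Char) : ∀ (fuel : Nat) (cur : List Char) (acc : List (List Char)),
    l.length < fuel →
    PySem.Chars.splitOn.go ['/'] fuel l cur acc = acc.reverse ++ pvSplit cur.reverse l := by
  induction l with
  | nil =>
      intro fuel cur acc h
      match fuel with
      | f + 1 => simp [PySem.Chars.splitOn.go, pvSplit]
  | cons c rest ih =>
      intro fuel cur acc h
      match fuel with
      | f + 1 =>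
        by_cases hc : c = '/'
        · subst hc
          rw [show PySem.Chars.splitOn.go ['/'] (f + 1) ('/' :: rest) cur acc
              = PySem.Chars.splitOn.go ['/'] f rest [] (cur.reverse :: acc) from by
                simp [PySem.Chars.splitOn.go, List.isPrefixOf]]
          rw [ih f [] (cur.reverse :: acc) (by simpa using Nat.lt_of_succ_lt_succ h)]
          simp [pvSplit]
        · rw [show PySem.Chars.splitOn.go ['/'] (f + 1) (c :: rest) cur acc
              = PySem.Chars.splitOn.go ['/'] f rest (c :: cur) acc from by
                simp [PySem.Chars.splitOn.go, List.isPrefixOf, BEq.symm_false,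
                  (by simpa [eq_comm] using hc : ¬ ('/' : Char) = c)]]
          rw [ih f (c :: cur) acc (by simpa using Nat.lt_of_succ_lt_succ h)]
          simp [pvSplit, hc]

lemma pvSplitOn_eq (cs : List Char) : PySem.Chars.splitOn cs ['/'] = pvSplit [] cs := by
  unfold PySem.Chars.splitOn
  rw [pvSplitOn_go cs (cs.length + 1) [] [] (Nat.lt_succ_self _)]
  simp

lemma pvSplit_ne_nil : ∀ (cs pre : List Char), pvSplit pre cs ≠ [] := by
  intro cs
  induction cs with
  | nil => intro pre; simp [pvSplit]
  | cons c rest ih =>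
      intro pre
      by_cases hc : c = '/' <;> simp [pvSplit, hc, ih]

lemma pvJoin_pvSplit : ∀ (cs pre : List Char), pvJoin (pvSplit pre cs) = pre ++ cs := by
  intro cs
  induction cs with
  | nil => intro pre; simp [pvSplit, pvJoin]
  | cons c rest ih =>
      intro pre
      by_cases hc : c = '/'
      · subst hc
        rw [pvSplit, if_pos rfl]
        cases h : pvSplit [] rest with
        | nil => exact absurd h (pvSplit_ne_nil rest [])
        | cons s ss =>
            rw [pvJoin_cons_cons, ← h, ih []]
            simp
      · rw [pvSplit, if_neg hc, ih (pre ++ [c])]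
        simp

lemma pvSplit_no_slash : ∀ (cs pre : List Char), '/' ∉ pre →
    ∀ seg ∈ pvSplit pre cs, '/' ∉ seg := by
  intro cs
  induction cs with
  | nil =>
      intro pre hpre seg hseg
      rw [pvSplit] at hseg
      simp only [List.mem_singleton] at hseg
      simpa [hseg] using hpre
  | cons c rest ih =>
      intro pre hpre seg hseg
      by_cases hc : c = '/'
      · subst hc
        rw [pvSplit, if_pos rfl] at hseg
        rcases List.mem_cons.mp hseg with h1 | h1
        · simpa [h1] using hpre
        · exact ih [] (by simp) seg h1
      · rw [pvSplit, if_neg hc] at hseg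
        exact ih (pre ++ [c]) (by simp [hpre, Ne.symm hc]) seg hseg

-- the piece-table index of a character (B's pt.index(c) under the guard)
def pvIdxB (c : Char) : Int := ((PySem.List.index? pvPtStr c).getD 0 : Nat)

-- the common inner emission, recursively: pieces of a rank starting at column col
def pvEmitFrom (row : Int) : Int → List Char → List (Int × Int)
  | _,   [] => []
  | col, c :: rest =>
      if pvPtStr.contains c then (row * 8 + col, pvIdxB c) :: pvEmitFrom row (col + 1) rest
      else pvEmitFrom row (col + pvWidthB c) rest

-- total width of a rank (A's final column offset)
def pvW (s : List Char) : Int := (s.map pvWidthB).sum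

-- per-character facts tying A's dict to B's string table
lemma pvMem_facts (c : Char) (h : c ∈ pvPtStr) :
    ∃ pv : Int × Int, pvFenToPT.get? c = some pv ∧ pv.2 = pvIdxB c
      ∧ PySem.Chars.upperChar c ≠ 'K' ∧ PySem.Chars.isdigit c = false
      ∧ pvWidthB c = 1 := by
  fin_cases h <;> exact ⟨_, rfl, by decide, by decide, by decide, by decide⟩

lemma pvNotMem (c : Char) (h : c ∉ pvPtStr) : pvFenToPT.get? c = none := by
  simp only [pvFenToPT, PySem.Dict.get?_mk_cons]
  split_ifs
  all_goals try exact absurd (by rw [show c = _ from (beq_iff_eq.mp (by assumption)).symm]; decide) h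
  simp [PySem.Dict.get?]

-- A's inner scan over a slash-free rank: row unchanged, col advanced by pvW, board extended
lemma pvInnerA : ∀ (s : List Char), (∀ c ∈ s, ¬ c = '/') →
    ∀ (row col : Int) (board : List (Int × Int)),
    s.foldl pvStepA (row, col, board) = (row, col + pvW s, board ++ pvEmitFrom row col s) := by
  intro s
  induction s with
  | nil => intro _ row col board; simp [pvW, pvEmitFrom]
  | cons c rest ih =>
      intro hs row col board
      have hc : ¬ c = '/' := hs c (by simp)
      have hrest : ∀ x ∈ rest, ¬ x = '/' := fun x hx => hs x (by simp [hx])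
      have hW : pvW (c :: rest) = pvWidthB c + pvW rest := by
        simp [pvW]
      by_cases hmem : c ∈ pvPtStr
      · obtain ⟨pv, hopt, hsnd, hK, hd, h1⟩ := pvMem_facts c hmem
        have hstep : pvStepA (row, col, board) c
            = (row, col + 1, board ++ [(row * 8 + col, pv.2)]) := by
          simp [pvStepA, hc, hd, hopt, hK]
        have hE : pvEmitFrom row col (c :: rest)
            = (row * 8 + col, pvIdxB c) :: pvEmitFrom row (col + 1) rest := by
          simp [pvEmitFrom, hmem]
        rw [List.foldl_cons, hstep, ih hrest row (col + 1) _, hE, hW, hsnd, h1]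
        simp only [Prod.mk.injEq, true_and]
        exact ⟨by ring, by simp⟩
      · have hcont : pvPtStr.contains c = false :=
          Bool.eq_false_iff.mpr (fun hcc => hmem (List.contains_iff_mem.mp hcc))
        have hstep : pvStepA (row, col, board) c = (row, col + pvWidthB c, board) := by
          by_cases hd : PySem.Chars.isdigit c = true
          · simp [pvStepA, pvWidthB, hc, hd]
          · have hopt : pvFenToPT.get? c = none := pvNotMem c hmem
            simp [pvStepA, pvWidthB, hc, hd, hopt, hmem]
        have hE : pvEmitFrom row col (c :: rest)
            = pvEmitFrom row (col + pvWidthB c) rest := by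
          simp [pvEmitFrom, hmem]
        rw [List.foldl_cons, hstep, ih hrest row (col + pvWidthB c) board, hE, hW]
        simp only [Prod.mk.injEq, true_and, and_true]
        ring

-- B's staged prefix-sum fold, characterised recursively
def pvColsFrom : Int → List Int → List Int
  | _, [] => []
  | c0, w :: ws => c0 :: pvColsFrom (c0 + w) ws

lemma pvColsB_go : ∀ (ws : List Int) (c0 : Int) (acc : List Int),
    (ws.foldl (fun st w => (st.1 + w, st.2 ++ [st.1])) (c0, acc)).2
      = acc ++ pvColsFrom c0 ws := by
  intro ws
  induction ws with
  | nil => intro c0 acc; simp [pvColsFrom]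
  | cons w ws ih => intro c0 acc; rw [List.foldl_cons, ih]; simp [pvColsFrom]

-- B's zip-comprehension over a rank = pvEmitFrom
lemma pvEmitB_go : ∀ (s : List Char) (row c0 : Int),
    (s.zip (pvColsFrom c0 (s.map pvWidthB))).filterMap
      (fun cc => if pvPtStr.contains cc.1
        then some (row * 8 + cc.2, pvIdxB cc.1)
        else none)
      = pvEmitFrom row c0 s := by
  intro s
  induction s with
  | nil => intro row c0; simp [pvEmitFrom]
  | cons c rest ih =>
      intro row c0
      rw [List.map_cons, pvColsFrom, List.zip_cons_cons, List.filterMap_cons]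
      by_cases hmem : c ∈ pvPtStr
      · have h1 : pvWidthB c = 1 := by
          obtain ⟨_, _, _, _, _, h1⟩ := pvMem_facts c hmem
          exact h1
        have hcont : pvPtStr.contains c = true := List.contains_iff_mem.mpr hmem
        simp only [hcont, h1, ih row (c0 + 1)]
        simp [pvEmitFrom, hmem]
      · have hcont : pvPtStr.contains c = false :=
          Bool.eq_false_iff.mpr (fun hcc => hmem (List.contains_iff_mem.mp hcc))
        simp only [hcont, Bool.false_eq_true, if_false, ih row (c0 + pvWidthB c)]
        simp [pvEmitFrom, hmem]

lemma pvEmitB_eq (row : Int) (s : List Char) : pvEmitB row s = pvEmitFrom row 0 s := by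
  unfold pvEmitB pvColsB
  rw [pvColsB_go (s.map pvWidthB) 0 []]
  simpa [pvIdxB] using pvEmitB_go s row 0

-- outer loop: A over the joined segments = B's enumerate fold
lemma pvOuter (segs : List (List Char)) : (∀ seg ∈ segs, '/' ∉ seg) →
    ∀ (row : Int) (board : List (Int × Int)),
    ((pvJoin segs).foldl pvStepA (row, 0, board)).2.2
      = (PySem.List.enumerate segs row).foldl
          (fun b rr => b ++ pvEmitB rr.1 rr.2) board := by
  induction segs with
  | nil => intro _ row board; simp [pvJoin, PySem.List.enumerate_nil]
  | cons s rest ih =>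
      intro hseg row board
      have hs : ∀ c ∈ s, ¬ c = '/' := by
        intro c hcmem hc; exact (hseg s (by simp)) (hc ▸ hcmem)
      rw [PySem.List.enumerate_cons, List.foldl_cons]
      cases rest with
      | nil =>
          rw [show pvJoin [s] = s from rfl, pvInnerA s hs row 0 board]
          simp [PySem.List.enumerate_nil, pvEmitB_eq]
      | cons s2 rest2 =>
          rw [pvJoin_cons_cons, List.foldl_append, pvInnerA s hs row 0 board, List.foldl_cons]
          rw [show pvStepA (row, 0 + pvW s, board ++ pvEmitFrom row 0 s) '/'
              = (row + 1, 0, board ++ pvEmitFrom row 0 s) from rfl]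
          rw [ih (fun seg h => hseg seg (by simp [h])) (row + 1) _]
          rw [pvEmitB_eq]

-- ===== VERDICT (by name: the statement is the Claim_ definition above) =====
theorem fen_to_board_py_spec : Claim_equal_fen_to_board_py := by
  intro fen _ _
  unfold Spec_fen_to_board_py fen_to_board_py fen_to_board_py_alt
  cases h : PySem.Str.split₀ fen with
  | nil => rfl
  | cons p0 rest =>
      simp only [pvSplitOn_eq]
      have hJ := pvJoin_pvSplit p0.toList []
      simp only [List.nil_append] at hJ
      conv_lhs => rw [← hJ]
      exact pvOuter (pvSplit [] p0.toList)
        (pvSplit_no_slash p0.toList [] (by simp)) 0 []
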